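-- pv_equiv track=rewrite | github.com/MrBrantCode/unitest_baseline | mut_generate/mist_train_taco/taco_12843/solution.py | count_score_assignments
-- ===== SOURCE A (Python) =====
-- def count_score_assignments(N: int, M: int) -> int:
--     """
--     Calculate the number of ways to assign scores to N problems such that:
--     - Each problem i gets an integer score A_i between 1 and N, inclusive.
--     - The problems are sorted by difficulty: A_1 <= A_2 <= ... <= A_N.
--     - For any k (1 <= k <= N-1), the sum of scores of any k problems is strictly less than the sum of scores of any k+1 problems.
--
--     The result is returned modulo M.
--
--     Parameters:
--     - N (int): The number of problems.
--     - M (int): The prime modulo.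
--
--     Returns:
--     - int: The number of ways to assign scores modulo M.
--     """
--     A = list(range(1, N // 2 + 1)) * 2
--     if N & 1:
--         A += [(N + 1) // 2]
--     d = [1] + [0] * (N + N)
--     for x in A:
--         for i in range(N + 1):
--             d[i] %= M
--             d[i + x] += d[i]
--     return sum(d[:N]) % M
-- ===== SOURCE B (Python) =====
-- def count_score_assignments(N: int, M: int) -> int:
--     # Alternative decomposition: build P = coefficients of prod_{x=1..N//2} 1/(1-z^x)
--     # truncated to degree N-1 (k forward passes), square it by one explicit
--     # self-convolution (each part value 1..N//2 is available in two colours),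
--     # apply one more unbounded pass for the middle part (N+1)//2 when N is odd,
--     # and sum the first N coefficients.  Reduced mod M throughout.
--     k = N // 2
--     L = max(N, 0)
--     P = [0] * L
--     if L:
--         P[0] = 1 % M
--     for x in range(1, k + 1):
--         for j in range(x, L):
--             P[j] = (P[j] + P[j - x]) % M
--     Q = [0] * L
--     for j in range(L):
--         s = 0
--         for i in range(j + 1):
--             s += P[i] * P[j - i]
--         Q[j] = s % M
--     if N > 0 and N & 1:
--         m = (N + 1) // 2
--         for j in range(m, L):
--             Q[j] = (Q[j] + Q[j - m]) % M
--     return sum(Q) % M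
-- ===== Notes on version B (the rewrite author's own statement) =====
-- stated objective: alternative
-- what changed: Instead of 2*(N//2) in-place unbounded-knapsack passes over one length-2N+1 array with lazy mod, B runs N//2 passes once to get P = coefficients of prod 1/(1-z^x) truncated to degree N-1, squares P by one explicit self-convolution (each part value comes in two colours), adds the odd middle part by a single extra pass, and sums, reducing mod M eagerly (intended as faster by a constant factor; measured about 2x at n=1024 but unconfirmed at the largest probe size).
import Mathlib
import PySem

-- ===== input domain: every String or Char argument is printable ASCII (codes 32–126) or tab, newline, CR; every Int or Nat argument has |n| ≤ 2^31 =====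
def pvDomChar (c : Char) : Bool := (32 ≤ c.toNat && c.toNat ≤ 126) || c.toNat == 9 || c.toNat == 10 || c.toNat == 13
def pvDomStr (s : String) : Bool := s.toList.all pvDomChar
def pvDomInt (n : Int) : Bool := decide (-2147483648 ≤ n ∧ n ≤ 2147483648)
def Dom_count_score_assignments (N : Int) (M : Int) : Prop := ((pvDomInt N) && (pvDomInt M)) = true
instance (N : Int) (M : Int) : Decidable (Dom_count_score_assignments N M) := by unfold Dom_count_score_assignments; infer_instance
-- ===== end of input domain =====

-- B replaces A's 2*(N//2) in-place knapsack passes over one array by N//2 passes building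
-- P = coefficients of prod_{x=1..N//2} 1/(1-z^x), one explicit self-convolution P*P, and one
-- extra pass for the odd middle part, reducing mod M eagerly (objective: alternative).

-- ===== PORT A =====
-- The Python list d = [1] + [0]*(N+N) is an Array Int; whenever the loop body executes,
-- both touched indices lie inside 0..2N (proved in the lemmas below), so
-- setIfInBounds/getD are exact for Python's d[i] = v and d[i].
-- inner loop: for i in range(N+1): d[i] %= M; d[i+x] += d[i]
def pvA_inner (N M x : Int) (i : Int) (d : Array Int) : Array Int :=
  if _h : i < N + 1 then
    let d1 := d.setIfInBounds i.toNat (PySem.Int.mod (d.getD i.toNat 0) M)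
    let d2 := d1.setIfInBounds (i + x).toNat (d1.getD (i + x).toNat 0 + d1.getD i.toNat 0)
    pvA_inner N M x (i + 1) d2
  else d
termination_by (N + 1 - i).toNat
decreasing_by omega

-- outer loop: for x in A
def pvA_outer (N M : Int) (xs : List Int) (d : Array Int) : Array Int :=
  match xs with
  | [] => d
  | x :: rest => pvA_outer N M rest (pvA_inner N M x 0 d)

def count_score_assignments (N : Int) (M : Int) : Int :=
  -- A = list(range(1, N//2+1)) * 2, plus [(N+1)//2] if N & 1
  let A := PySem.List.pyRange 1 (PySem.Int.floordiv N 2 + 1) 1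
            ++ PySem.List.pyRange 1 (PySem.Int.floordiv N 2 + 1) 1
  let A := if PySem.Int.band N 1 ≠ 0 then A ++ [PySem.Int.floordiv (N + 1) 2] else A
  let d0 : Array Int := ([(1 : Int)] ++ List.replicate (N + N).toNat 0).toArray
  let d := pvA_outer N M A d0
  -- sum(d[:N]) % M ; d[:N] is the first max(N,0) entries (the list has length ≥ N+1 when N ≥ 0)
  PySem.Int.mod (((List.range N.toNat).map (fun j : Nat => d.getD j 0)).sum) M

-- ===== PORT B =====
-- The Python lists P and Q (length L = max(N,0)) are likewise Array Int; every index the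
-- loops touch lies inside 0..L-1, so setIfInBounds/getD are exact.
-- for j in range(x, L): P[j] = (P[j] + P[j-x]) % M   (also the odd pass on Q, with x = m)
def pvB_pass (L M x : Int) (j : Int) (P : Array Int) : Array Int :=
  if _h : j < L then
    pvB_pass L M x (j + 1)
      (P.setIfInBounds j.toNat (PySem.Int.mod (P.getD j.toNat 0 + P.getD (j - x).toNat 0) M))
  else P
termination_by (L - j).toNat
decreasing_by omega

-- for x in range(1, k+1): (inner pass)
def pvB_passes (L M : Int) (x k : Int) (P : Array Int) : Array Int :=
  if _h : x < k + 1 then pvB_passes L M (x + 1) k (pvB_pass L M x x P) else P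
termination_by (k + 1 - x).toNat
decreasing_by omega

-- s = 0; for i in range(j+1): s += P[i] * P[j-i]
def pvB_dot (P : Array Int) (j : Int) (i : Int) (s : Int) : Int :=
  if _h : i < j + 1 then
    pvB_dot P j (i + 1) (s + P.getD i.toNat 0 * P.getD (j - i).toNat 0)
  else s
termination_by (j + 1 - i).toNat
decreasing_by omega

-- for j in range(L): Q[j] = s % M
def pvB_Q (L M : Int) (P : Array Int) (j : Int) (Q : Array Int) : Array Int :=
  if _h : j < L then
    pvB_Q L M P (j + 1) (Q.setIfInBounds j.toNat (PySem.Int.mod (pvB_dot P j 0 0) M))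
  else Q
termination_by (L - j).toNat
decreasing_by omega

-- sum(Q)
def pvB_sum (L : Int) (Q : Array Int) (j : Int) (s : Int) : Int :=
  if _h : j < L then pvB_sum L Q (j + 1) (s + Q.getD j.toNat 0) else s
termination_by (L - j).toNat
decreasing_by omega

def count_score_assignments_alt (N : Int) (M : Int) : Int :=
  let k := PySem.Int.floordiv N 2
  let L : Int := max N 0
  let P0 : Array Int := (List.replicate L.toNat (0 : Int)).toArray   -- P = [0] * L
  let P1 := if L ≠ 0 then P0.setIfInBounds 0 (PySem.Int.mod 1 M) else P0   -- if L: P[0] = 1 % M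
  let P := pvB_passes L M 1 k P1
  let Q0 : Array Int := (List.replicate L.toNat (0 : Int)).toArray   -- Q = [0] * L
  let Q1 := pvB_Q L M P 0 Q0
  let Q2 := if 0 < N ∧ PySem.Int.band N 1 ≠ 0 then
      pvB_pass L M (PySem.Int.floordiv (N + 1) 2) (PySem.Int.floordiv (N + 1) 2) Q1
    else Q1
  PySem.Int.mod (pvB_sum L Q2 0 0) M

-- ===== PRECONDITION & SPEC =====
-- Pre_ excludes only M = 0, on which Python's '%' raises ZeroDivisionError in both programs.
def Pre_count_score_assignments (N : Int) (M : Int) : Prop := M ≠ 0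
instance (N : Int) (M : Int) : Decidable (Pre_count_score_assignments N M) := by
  unfold Pre_count_score_assignments; infer_instance

def pvWitness_count_score_assignments : Int × Int := (7, 5)

def Spec_count_score_assignments (N : Int) (M : Int) (out : Int) : Prop := out = count_score_assignments_alt N M
instance (N : Int) (M : Int) (out : Int) : Decidable (Spec_count_score_assignments N M out) := by
  unfold Spec_count_score_assignments; infer_instance

-- ===== CLAIM (what is proved, stated in full; the proofs are below) =====
def Claim_equal_count_score_assignments : Prop := ∀ (N : Int) (M : Int), Dom_count_score_assignments N M → Pre_count_score_assignments N M → Spec_count_score_assignments N M (count_score_assignments N M)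

-- ===== LEMMAS AND PROOFS =====

-- Pure (no mod) specification layer: coefficient sequences as functions ℕ → ℤ.
def pvDelta : Nat → Int := fun n => if n = 0 then 1 else 0

-- one unbounded forward knapsack pass = multiplication by 1/(1-z^x)
def pvPass (x : Nat) (f : Nat → Int) : Nat → Int
  | j => f j + if _h : 0 < x ∧ x ≤ j then pvPass x f (j - x) else 0
termination_by j => j
decreasing_by omega

def pvFold (xs : List Nat) (f : Nat → Int) : Nat → Int := xs.foldl (fun g x => pvPass x g) f

def pvConv (f g : Nat → Int) (j : Nat) : Int := ∑ i ∈ Finset.range (j + 1), f i * g (j - i)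

-- A's in-place pass with its lazy mod: r j = (f j + r (j-x)) % M
def pvRA (M : Int) (x : Nat) (f : Nat → Int) : Nat → Int
  | j => PySem.Int.mod (f j + if _h : 0 < x ∧ x ≤ j then pvRA M x f (j - x) else 0) M
termination_by j => j
decreasing_by omega

-- B's in-place pass with eager mod: r j = (f j + r (j-x)) % M for j ≥ x, else f j
def pvRB (M : Int) (x : Nat) (f : Nat → Int) : Nat → Int
  | j => if _h : 0 < x ∧ x ≤ j then PySem.Int.mod (f j + pvRB M x f (j - x)) M else f j
termination_by j => j
decreasing_by omega

theorem pv_pymod_modEq (a M : Int) : PySem.Int.mod a M ≡ a [ZMOD M] := by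
  rw [Int.modEq_iff_dvd]
  have h := PySem.Int.floordiv_mul_add_mod a M
  exact ⟨PySem.Int.floordiv a M, by linarith [h]⟩

theorem pv_pymod_congr {a b M : Int} (hM : M ≠ 0) (h : a ≡ b [ZMOD M]) :
    PySem.Int.mod a M = PySem.Int.mod b M := by
  have h1 : PySem.Int.mod a M ≡ PySem.Int.mod b M [ZMOD M] :=
    ((pv_pymod_modEq a M).trans h).trans (pv_pymod_modEq b M).symm
  have hdvd : M ∣ (PySem.Int.mod b M - PySem.Int.mod a M) := Int.modEq_iff_dvd.mp h1
  have hdvd' : |M| ∣ (PySem.Int.mod b M - PySem.Int.mod a M) := (abs_dvd _ _).mpr hdvd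
  have hz : PySem.Int.mod b M - PySem.Int.mod a M = 0 := by
    apply Int.eq_zero_of_abs_lt_dvd hdvd'
    rcases lt_or_gt_of_ne hM with hneg | hpos
    · have b1 := PySem.Int.mod_neg_bounds a hneg
      have b2 := PySem.Int.mod_neg_bounds b hneg
      rw [abs_lt, abs_of_neg hneg]; omega
    · have b1 := PySem.Int.mod_nonneg a hpos
      have b2 := PySem.Int.mod_nonneg b hpos
      have c1 := PySem.Int.mod_lt a hpos
      have c2 := PySem.Int.mod_lt b hpos
      rw [abs_lt, abs_of_pos hpos]; omega
  omega

theorem pv_sum_modEq {M : Int} {n : Nat} {f g : Nat → Int}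
    (h : ∀ i, i < n → f i ≡ g i [ZMOD M]) :
    (∑ i ∈ Finset.range n, f i) ≡ (∑ i ∈ Finset.range n, g i) [ZMOD M] := by
  induction n with
  | zero => simp
  | succ m ih =>
      rw [Finset.sum_range_succ, Finset.sum_range_succ]
      exact Int.ModEq.add (ih (fun i hi => h i (by omega))) (h m (by omega))

theorem pvConv_delta (f : Nat → Int) : ∀ j, pvConv f pvDelta j = f j := by
  intro j
  unfold pvConv
  rw [Finset.sum_eq_single j]
  · simp [pvDelta]
  · intro i hi hne
    have : j - i ≠ 0 := by
      simp only [Finset.mem_range] at hi; omega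
    simp [pvDelta, this]
  · intro hj
    simp only [Finset.mem_range] at hj; omega

theorem pvPass_conv (x : Nat) (f g : Nat → Int) :
    ∀ j, pvPass x (pvConv f g) j = pvConv f (pvPass x g) j := by
  intro j
  induction j using Nat.strong_induction_on with
  | _ j IH =>
  have hR : pvConv f (pvPass x g) j
      = pvConv f g j + ∑ i ∈ Finset.range (j + 1),
          f i * (if 0 < x ∧ x ≤ j - i then pvPass x g (j - i - x) else 0) := by
    unfold pvConv
    rw [← Finset.sum_add_distrib]
    apply Finset.sum_congr rfl
    intro i _hi
    rw [pvPass]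
    by_cases hcc : 0 < x ∧ x ≤ j - i
    · rw [dif_pos hcc, if_pos hcc, mul_add]
    · rw [dif_neg hcc, if_neg hcc, mul_add]
  by_cases hx : 0 < x ∧ x ≤ j
  · have htail : ∑ i ∈ Finset.range (j + 1),
        f i * (if 0 < x ∧ x ≤ j - i then pvPass x g (j - i - x) else 0)
        = pvConv f (pvPass x g) (j - x) := by
      have hsub : Finset.range (j - x + 1) ⊆ Finset.range (j + 1) := by
        intro t ht
        simp only [Finset.mem_range] at *
        omega
      rw [← Finset.sum_subset hsub]
      · unfold pvConv
        apply Finset.sum_congr rfl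
        intro i hi
        simp only [Finset.mem_range] at hi
        have hle : x ≤ j - i := by omega
        rw [if_pos ⟨hx.1, hle⟩]
        congr 2
        omega
      · intro i hi hni
        simp only [Finset.mem_range] at hi hni
        have : ¬ (x ≤ j - i) := by omega
        rw [if_neg (by tauto)]
        ring
    rw [pvPass, dif_pos hx, IH (j - x) (by omega), hR, htail]
  · have htail : ∑ i ∈ Finset.range (j + 1),
        f i * (if 0 < x ∧ x ≤ j - i then pvPass x g (j - i - x) else 0) = 0 := by
      apply Finset.sum_eq_zero
      intro i hi
      simp only [Finset.mem_range] at hi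
      have : ¬ (0 < x ∧ x ≤ j - i) := by omega
      rw [if_neg this]; ring
    rw [pvPass, dif_neg hx, hR, htail]

theorem pvFold_conv (xs : List Nat) (f : Nat → Int) :
    ∀ (g : Nat → Int) (j : Nat), pvFold xs (pvConv f g) j = pvConv f (pvFold xs g) j := by
  induction xs with
  | nil => intro g j; rfl
  | cons a l ih =>
      intro g j
      have h1 : pvPass a (pvConv f g) = pvConv f (pvPass a g) := funext (pvPass_conv a f g)
      show pvFold l (pvPass a (pvConv f g)) j = pvConv f (pvFold l (pvPass a g)) j
      rw [h1]
      exact ih (pvPass a g) j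

theorem pvFold_conv_self (xs : List Nat) (f : Nat → Int) :
    ∀ j, pvFold xs f j = pvConv f (pvFold xs pvDelta) j := by
  intro j
  have hf : pvConv f pvDelta = f := funext (pvConv_delta f)
  conv_lhs => rw [← hf]
  exact pvFold_conv xs f pvDelta j

theorem pvRA_congr {M : Int} {x : Nat} {f g : Nat → Int} {B : Nat}
    (h : ∀ t, t ≤ B → f t ≡ g t [ZMOD M]) :
    ∀ j, j ≤ B → pvRA M x f j ≡ pvPass x g j [ZMOD M] := by
  intro j
  induction j using Nat.strong_induction_on with
  | _ j IH =>
  intro hj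
  rw [pvRA, pvPass]
  by_cases hc : 0 < x ∧ x ≤ j
  · rw [dif_pos hc, dif_pos hc]
    exact (pv_pymod_modEq _ _).trans
      (Int.ModEq.add (h j hj) (IH (j - x) (by omega) (by omega)))
  · rw [dif_neg hc, dif_neg hc]
    exact (pv_pymod_modEq _ _).trans (Int.ModEq.add (h j hj) (Int.ModEq.refl 0))

theorem pvRB_congr {M : Int} {x : Nat} {f g : Nat → Int} {B : Nat}
    (h : ∀ t, t ≤ B → f t ≡ g t [ZMOD M]) :
    ∀ j, j ≤ B → pvRB M x f j ≡ pvPass x g j [ZMOD M] := by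
  intro j
  induction j using Nat.strong_induction_on with
  | _ j IH =>
  intro hj
  rw [pvRB, pvPass]
  by_cases hc : 0 < x ∧ x ≤ j
  · rw [dif_pos hc, dif_pos hc]
    exact (pv_pymod_modEq _ _).trans
      (Int.ModEq.add (h j hj) (IH (j - x) (by omega) (by omega)))
  · rw [dif_neg hc, dif_neg hc]
    simpa using h j hj

-- characterization of A's in-place inner loop: after the pass, entry j (0 ≤ j ≤ N) holds pvRA
-- array access helpers
theorem pv_size_set (d : Array Int) (i : Nat) (v : Int) :
    (d.setIfInBounds i v).size = d.size := Array.size_setIfInBounds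

theorem pv_getD_set_self (d : Array Int) (i : Nat) (v : Int) (h : i < d.size) :
    (d.setIfInBounds i v).getD i 0 = v := by
  simp [Array.getD_eq_getD_getElem?, h]

theorem pv_getD_set_ne (d : Array Int) (i j : Nat) (v : Int) (h : i ≠ j) :
    (d.setIfInBounds i v).getD j 0 = d.getD j 0 := by
  simp [Array.getD_eq_getD_getElem?, h]

theorem pv_getD_toArray (l : List Int) (i : Nat) : l.toArray.getD i 0 = l.getD i 0 := by
  simp only [Array.getD_eq_getD_getElem?, List.getElem?_toArray, List.getD_eq_getElem?_getD]

theorem pv_getD_replicate (n i : Nat) :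
    ((List.replicate n (0 : Int)).toArray).getD i 0 = 0 := by
  simp [Array.getD]

-- sizes are preserved by the loops
theorem pvA_inner_size (N M x : Int) :
    ∀ (i : Int) (d : Array Int), (pvA_inner N M x i d).size = d.size := by
  intro i d
  induction hfe : (N + 1 - i).toNat using Nat.strong_induction_on generalizing i d with
  | _ fuel IHf =>
  rw [pvA_inner]
  by_cases hlt : i < N + 1
  · rw [dif_pos hlt]
    rw [IHf ((N + 1 - (i + 1)).toNat) (by omega) (i + 1) _ rfl]
    rw [pv_size_set, pv_size_set]
  · rw [dif_neg hlt]

theorem pvB_pass_size (L M x : Int) :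
    ∀ (j : Int) (P : Array Int), (pvB_pass L M x j P).size = P.size := by
  intro j P
  induction hfe : (L - j).toNat using Nat.strong_induction_on generalizing j P with
  | _ fuel IHf =>
  rw [pvB_pass]
  by_cases hlt : j < L
  · rw [dif_pos hlt]
    rw [IHf ((L - (j + 1)).toNat) (by omega) (j + 1) _ rfl, pv_size_set]
  · rw [dif_neg hlt]

theorem pvB_Q_size (L M : Int) (P : Array Int) :
    ∀ (j : Int) (Q : Array Int), (pvB_Q L M P j Q).size = Q.size := by
  intro j Q
  induction hfe : (L - j).toNat using Nat.strong_induction_on generalizing j Q with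
  | _ fuel IHf =>
  rw [pvB_Q]
  by_cases hlt : j < L
  · rw [dif_pos hlt]
    rw [IHf ((L - (j + 1)).toNat) (by omega) (j + 1) _ rfl, pv_size_set]
  · rw [dif_neg hlt]

theorem pvB_passes_size (L M : Int) :
    ∀ (x k : Int) (P : Array Int), (pvB_passes L M x k P).size = P.size := by
  intro x k P
  induction hfe : (k + 1 - x).toNat using Nat.strong_induction_on generalizing x P with
  | _ fuel IHf =>
  rw [pvB_passes]
  by_cases hlt : x < k + 1
  · rw [dif_pos hlt]
    rw [IHf ((k + 1 - (x + 1)).toNat) (by omega) (x + 1) _ rfl, pvB_pass_size]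
  · rw [dif_neg hlt]

-- characterization of A's in-place inner loop: after the pass, entry j (0 ≤ j ≤ N) holds pvRA
theorem pvA_inner_char (N M x : Int) (hx : 1 ≤ x) (hxN : x ≤ N) (dInit : Array Int)
    (hsz : ((N + N).toNat + 1 : Nat) = dInit.size) :
    ∀ (i : Int) (d : Array Int), 0 ≤ i → i ≤ N + 1 → d.size = dInit.size →
    (∀ j : Int, 0 ≤ j → j < i →
        d.getD j.toNat 0 = pvRA M x.toNat (fun t : Nat => dInit.getD t 0) j.toNat) →
    (∀ j : Int, i ≤ j → d.getD j.toNat 0 = dInit.getD j.toNat 0 +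
        (if x ≤ j ∧ j - x < i then
           pvRA M x.toNat (fun t : Nat => dInit.getD t 0) (j - x).toNat else 0)) →
    ∀ j : Int, 0 ≤ j → j ≤ N →
      (pvA_inner N M x i d).getD j.toNat 0
        = pvRA M x.toNat (fun t : Nat => dInit.getD t 0) j.toNat := by
  intro i d
  induction hfe : (N + 1 - i).toNat using Nat.strong_induction_on generalizing i d with
  | _ fuel IHf =>
  intro hi0 hiN hds ha hb j hj0 hjN
  rw [pvA_inner]
  by_cases hlt : i < N + 1
  · rw [dif_pos hlt]
    have hiq : i.toNat < d.size := by omega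
    have hri : PySem.Int.mod (d.getD i.toNat 0) M
        = pvRA M x.toNat (fun t : Nat => dInit.getD t 0) i.toNat := by
      have harg : (i - x).toNat = i.toNat - x.toNat := by omega
      rw [hb i le_rfl]
      conv_rhs => rw [pvRA]
      by_cases hxi : x ≤ i
      · rw [if_pos ⟨hxi, by omega⟩,
          dif_pos (show 0 < x.toNat ∧ x.toNat ≤ i.toNat by omega), harg]
      · rw [if_neg (by omega), dif_neg (by omega), add_zero]
    set d1 := d.setIfInBounds i.toNat (PySem.Int.mod (d.getD i.toNat 0) M) with hd1
    set d2 := d1.setIfInBounds (i + x).toNat (d1.getD (i + x).toNat 0 + d1.getD i.toNat 0) with hd2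
    have hsz1 : d1.size = d.size := pv_size_set _ _ _
    have hsz2 : d2.size = d.size := by rw [hd2, pv_size_set, hsz1]
    have hixq : (i + x).toNat < d1.size := by rw [hsz1]; omega
    have hget1_i : d1.getD i.toNat 0 = PySem.Int.mod (d.getD i.toNat 0) M :=
      pv_getD_set_self _ _ _ hiq
    have hget1_ne : ∀ t : Nat, t ≠ i.toNat → d1.getD t 0 = d.getD t 0 := by
      intro t ht
      exact pv_getD_set_ne _ _ _ _ (fun he => ht he.symm)
    have hget2_ix : d2.getD (i + x).toNat 0 = d1.getD (i + x).toNat 0 + d1.getD i.toNat 0 :=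
      pv_getD_set_self _ _ _ hixq
    have hget2_ne : ∀ t : Nat, t ≠ (i + x).toNat → d2.getD t 0 = d1.getD t 0 := by
      intro t ht
      exact pv_getD_set_ne _ _ _ _ (fun he => ht he.symm)
    refine IHf ((N + 1 - (i + 1)).toNat) (by omega) (i + 1) d2 rfl (by omega) (by omega)
      (by rw [hsz2, hds]) ?_ ?_ j hj0 hjN
    · -- invariant (a) at i + 1
      intro j' h0 hlt'
      by_cases hji : j' = i
      · rw [hget2_ne j'.toNat (by omega), hji, hget1_i, hri]
      · rw [hget2_ne j'.toNat (by omega), hget1_ne j'.toNat (by omega)]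
        exact ha j' h0 (by omega)
    · -- invariant (b) at i + 1
      intro j' hij'
      by_cases hjx : j' = i + x
      · rw [hjx, hget2_ix, hget1_i, hri, hget1_ne (i + x).toNat (by omega)]
        rw [hb (i + x) (by omega), if_neg (by omega)]
        rw [if_pos (show x ≤ i + x ∧ i + x - x < i + 1 by omega)]
        rw [show i + x - x = i from by ring, add_zero]
      · rw [hget2_ne j'.toNat (by omega), hget1_ne j'.toNat (by omega)]
        rw [hb j' (by omega)]
        by_cases hc : x ≤ j' ∧ j' - x < i + 1
        · rw [if_pos hc, if_pos (show x ≤ j' ∧ j' - x < i by omega)]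
        · rw [if_neg hc, if_neg (show ¬ (x ≤ j' ∧ j' - x < i) by omega)]
  · rw [dif_neg hlt]
    exact ha j hj0 (by omega)

-- one executed pass of A, as a congruence with the pure pass
theorem pvA_pass_modEq {N M x : Int} {d : Array Int} {g : Nat → Int}
    (hx : 1 ≤ x) (hxN : x ≤ N)
    (hsz : ((N + N).toNat + 1 : Nat) = d.size)
    (h : ∀ t : Nat, (t : Int) ≤ N → d.getD t 0 ≡ g t [ZMOD M]) :
    ∀ t : Nat, (t : Int) ≤ N →
      (pvA_inner N M x 0 d).getD t 0 ≡ pvPass x.toNat g t [ZMOD M] := by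
  intro t ht
  have hchar := pvA_inner_char N M x hx hxN d hsz 0 d le_rfl (by omega) rfl
    (by intro j h0 hlt; omega)
    (by intro j hj; rw [if_neg (by omega), add_zero])
    (t : Int) (by omega) ht
  rw [Int.toNat_natCast] at hchar
  rw [hchar]
  exact pvRA_congr (B := N.toNat) (fun s hs => h s (by omega)) t (by omega)

theorem pvA_outer_modEq {N M : Int} :
    ∀ (xs : List Int), (∀ x ∈ xs, 1 ≤ x ∧ x ≤ N) →
    ∀ (d : Array Int) (g : Nat → Int),
      ((N + N).toNat + 1 : Nat) = d.size →
      (∀ t : Nat, (t : Int) ≤ N → d.getD t 0 ≡ g t [ZMOD M]) →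
    ∀ t : Nat, (t : Int) ≤ N →
      (pvA_outer N M xs d).getD t 0 ≡ pvFold (xs.map Int.toNat) g t [ZMOD M] := by
  intro xs
  induction xs with
  | nil => intro _ d g _ h t ht; exact h t ht
  | cons a l ih =>
      intro hmem d g hsz h t ht
      show (pvA_outer N M l (pvA_inner N M a 0 d)).getD t 0
          ≡ pvFold (l.map Int.toNat) (pvPass a.toNat g) t [ZMOD M]
      exact ih (fun x hx => hmem x (List.mem_cons_of_mem a hx))
        (pvA_inner N M a 0 d) (pvPass a.toNat g)
        (by rw [pvA_inner_size]; exact hsz)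
        (pvA_pass_modEq (hmem a List.mem_cons_self).1 (hmem a List.mem_cons_self).2 hsz h) t ht

-- characterization of B's in-place pass (also used for the odd-middle pass on Q)
theorem pvB_pass_char (L M x : Int) (hx : 1 ≤ x) (Pinit : Array Int)
    (hsz0 : Pinit.size = L.toNat) :
    ∀ (j : Int) (P : Array Int), x ≤ j → P.size = Pinit.size →
    (∀ t : Int, x ≤ t → t < j →
        P.getD t.toNat 0 = pvRB M x.toNat (fun s : Nat => Pinit.getD s 0) t.toNat) →
    (∀ t : Int, t < x ∨ j ≤ t → P.getD t.toNat 0 = Pinit.getD t.toNat 0) →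
    ∀ t : Int, 0 ≤ t → t < L →
      (pvB_pass L M x j P).getD t.toNat 0
        = pvRB M x.toNat (fun s : Nat => Pinit.getD s 0) t.toNat := by
  intro j P
  induction hfe : (L - j).toNat using Nat.strong_induction_on generalizing j P with
  | _ fuel IHf =>
  intro hxj hPsz ha hb t ht0 htL
  rw [pvB_pass]
  by_cases hlt : j < L
  · rw [dif_pos hlt]
    have hjq : j.toNat < P.size := by omega
    have hrj : PySem.Int.mod (P.getD j.toNat 0 + P.getD (j - x).toNat 0) M
        = pvRB M x.toNat (fun s : Nat => Pinit.getD s 0) j.toNat := by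
      have hPj : P.getD j.toNat 0 = Pinit.getD j.toNat 0 := hb j (Or.inr le_rfl)
      have hPjx : P.getD (j - x).toNat 0
          = pvRB M x.toNat (fun s : Nat => Pinit.getD s 0) (j - x).toNat := by
        by_cases hc : x ≤ j - x
        · exact ha (j - x) hc (by omega)
        · rw [hb (j - x) (Or.inl (by omega))]
          conv_rhs => rw [pvRB]
          rw [dif_neg (by omega)]
      conv_rhs => rw [pvRB]
      rw [dif_pos (show 0 < x.toNat ∧ x.toNat ≤ j.toNat by omega)]
      rw [hPj, hPjx, show j.toNat - x.toNat = (j - x).toNat from by omega]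
    refine IHf ((L - (j + 1)).toNat) (by omega) (j + 1) _ rfl (by omega)
      (by rw [pv_size_set]; exact hPsz) ?_ ?_ t ht0 htL
    · intro t' h1 h2
      by_cases hc : t' = j
      · rw [hc, pv_getD_set_self _ _ _ hjq, hrj]
      · rw [pv_getD_set_ne P j.toNat t'.toNat _ (by omega)]
        exact ha t' h1 (by omega)
    · intro t' h1
      rcases h1 with h1 | h1
      · rw [pv_getD_set_ne P j.toNat t'.toNat _ (by omega)]
        exact hb t' (Or.inl h1)
      · rw [pv_getD_set_ne P j.toNat t'.toNat _ (by omega)]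
        exact hb t' (Or.inr (by omega))
  · rw [dif_neg hlt]
    by_cases hc : x ≤ t
    · exact ha t hc (by omega)
    · rw [hb t (Or.inl (by omega))]
      conv_rhs => rw [pvRB]
      rw [dif_neg (by omega)]

theorem pvB_pass_modEq {L M x : Int} {P : Array Int} {g : Nat → Int}
    (hx : 1 ≤ x) (hsz : P.size = L.toNat)
    (h : ∀ t : Nat, (t : Int) < L → P.getD t 0 ≡ g t [ZMOD M]) :
    ∀ t : Nat, (t : Int) < L →
      (pvB_pass L M x x P).getD t 0 ≡ pvPass x.toNat g t [ZMOD M] := by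
  intro t ht
  have hchar := pvB_pass_char L M x hx P hsz x P le_rfl rfl
    (by intro t' h1 h2; omega)
    (by intro t' _; rfl)
    (t : Int) (by omega) ht
  rw [Int.toNat_natCast] at hchar
  rw [hchar]
  exact pvRB_congr (B := t) (fun s hs => h s (by omega)) t le_rfl

theorem pvB_passes_modEq {L M : Int} :
    ∀ (x k : Int) (P : Array Int) (g : Nat → Int), 1 ≤ x → P.size = L.toNat →
    (∀ t : Nat, (t : Int) < L → P.getD t 0 ≡ g t [ZMOD M]) →
    ∀ t : Nat, (t : Int) < L →
      (pvB_passes L M x k P).getD t 0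
        ≡ pvFold ((PySem.List.pyRange x (k + 1) 1).map Int.toNat) g t [ZMOD M] := by
  intro x k
  induction hfe : (k + 1 - x).toNat using Nat.strong_induction_on generalizing x with
  | _ fuel IHf =>
  intro P g hx hsz h t ht
  rw [pvB_passes]
  by_cases hlt : x < k + 1
  · rw [dif_pos hlt, PySem.List.pyRange_one_cons hlt]
    show (pvB_passes L M (x + 1) k (pvB_pass L M x x P)).getD t 0
      ≡ pvFold ((PySem.List.pyRange (x + 1) (k + 1) 1).map Int.toNat) (pvPass x.toNat g) t [ZMOD M]
    exact IHf ((k + 1 - (x + 1)).toNat) (by omega) (x + 1) rfl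
      (pvB_pass L M x x P) (pvPass x.toNat g) (by omega)
      (by rw [pvB_pass_size]; exact hsz) (pvB_pass_modEq hx hsz h) t ht
  · rw [dif_neg hlt, PySem.List.pyRange_one_eq_nil (by omega)]
    exact h t ht

theorem pvB_dot_char (P : Array Int) (jn : Nat) :
    ∀ (i s : Int), 0 ≤ i → i ≤ (jn : Int) + 1 →
      pvB_dot P (jn : Int) i s
        = s + ∑ u ∈ Finset.Ico i.toNat (jn + 1), P.getD u 0 * P.getD (jn - u) 0 := by
  intro i s
  induction hfe : ((jn : Int) + 1 - i).toNat using Nat.strong_induction_on generalizing i s with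
  | _ fuel IHf =>
  intro h0 h1
  rw [pvB_dot]
  by_cases hlt : i < (jn : Int) + 1
  · rw [dif_pos hlt]
    rw [IHf (((jn : Int) + 1 - (i + 1)).toNat) (by omega) (i + 1) _ rfl (by omega) (by omega)]
    rw [Finset.sum_eq_sum_Ico_succ_bot (show i.toNat < jn + 1 by omega)]
    rw [show ((jn : Int) - i).toNat = jn - i.toNat from by omega,
      show (i + 1).toNat = i.toNat + 1 from by omega, add_assoc]
  · rw [dif_neg hlt]
    have he : i.toNat = jn + 1 := by omega
    rw [he, Finset.Ico_self, Finset.sum_empty, add_zero]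

theorem pvB_dot_eq (P : Array Int) (jn : Nat) :
    pvB_dot P (jn : Int) 0 0
      = ∑ u ∈ Finset.range (jn + 1), P.getD u 0 * P.getD (jn - u) 0 := by
  rw [pvB_dot_char P jn 0 0 le_rfl (by omega), Finset.range_eq_Ico]
  norm_num

theorem pvB_Q_char (L M : Int) (P : Array Int) :
    ∀ (j : Int) (Q : Array Int), 0 ≤ j → Q.size = L.toNat →
    (∀ t : Int, 0 ≤ t → t < j → Q.getD t.toNat 0 = PySem.Int.mod (pvB_dot P t 0 0) M) →
    ∀ t : Int, 0 ≤ t → t < L →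
      (pvB_Q L M P j Q).getD t.toNat 0 = PySem.Int.mod (pvB_dot P t 0 0) M := by
  intro j Q
  induction hfe : (L - j).toNat using Nat.strong_induction_on generalizing j Q with
  | _ fuel IHf =>
  intro hj0 hQsz ha t ht0 htL
  rw [pvB_Q]
  by_cases hlt : j < L
  · rw [dif_pos hlt]
    have hjq : j.toNat < Q.size := by omega
    refine IHf ((L - (j + 1)).toNat) (by omega) (j + 1) _ rfl (by omega)
      (by rw [pv_size_set]; exact hQsz) ?_ t ht0 htL
    intro t' h0 h1
    by_cases hc : t' = j
    · rw [hc, pv_getD_set_self _ _ _ hjq]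
    · rw [pv_getD_set_ne Q j.toNat t'.toNat _ (by omega)]
      exact ha t' h0 (by omega)
  · rw [dif_neg hlt]
    exact ha t ht0 (by omega)

theorem pvB_sum_char (L : Int) (Q : Array Int) :
    ∀ (j s : Int), 0 ≤ j →
      pvB_sum L Q j s = s + ∑ u ∈ Finset.Ico j.toNat L.toNat, Q.getD u 0 := by
  intro j s
  induction hfe : (L - j).toNat using Nat.strong_induction_on generalizing j s with
  | _ fuel IHf =>
  intro hj0
  rw [pvB_sum]
  by_cases hlt : j < L
  · rw [dif_pos hlt]
    rw [IHf ((L - (j + 1)).toNat) (by omega) (j + 1) _ rfl (by omega)]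
    rw [Finset.sum_eq_sum_Ico_succ_bot (show j.toNat < L.toNat by omega)]
    rw [show (j + 1).toNat = j.toNat + 1 from by omega, add_assoc]
  · rw [dif_neg hlt]
    have he : Finset.Ico j.toNat L.toNat = ∅ := Finset.Ico_eq_empty (by omega)
    rw [he, Finset.sum_empty, add_zero]

theorem pv_list_sum (n : Nat) (f : Nat → Int) :
    ((List.range n).map f).sum = ∑ i ∈ Finset.range n, f i := by
  induction n with
  | zero => simp
  | succ m ih =>
      rw [List.range_succ, List.map_append, List.sum_append, Finset.sum_range_succ, ih]
      simp

theorem pvFold_append (l1 l2 : List Nat) (f : Nat → Int) :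
    pvFold (l1 ++ l2) f = pvFold l2 (pvFold l1 f) := by
  unfold pvFold
  rw [List.foldl_append]

theorem pvB_sum_stop (L : Int) (Q : Array Int) (j s : Int) (h : L ≤ j) :
    pvB_sum L Q j s = s := by
  rw [pvB_sum, dif_neg (by omega)]

theorem pv_main (N M : Int) (hM : M ≠ 0) :
    count_score_assignments N M = count_score_assignments_alt N M := by
  by_cases hN : N ≤ 0
  · -- N ≤ 0 : both programs sum an empty prefix and return 0 % M
    have h1 : count_score_assignments N M = PySem.Int.mod 0 M := by
      unfold count_score_assignments
      rw [show N.toNat = 0 by omega]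
      simp
    have h2 : count_score_assignments_alt N M = PySem.Int.mod 0 M := by
      have h2' : count_score_assignments_alt N M
          = PySem.Int.mod (pvB_sum (max N 0)
              (if 0 < N ∧ PySem.Int.band N 1 ≠ 0 then
                 pvB_pass (max N 0) M (PySem.Int.floordiv (N + 1) 2)
                   (PySem.Int.floordiv (N + 1) 2)
                   (pvB_Q (max N 0) M
                     (pvB_passes (max N 0) M 1 (PySem.Int.floordiv N 2)
                       (if max N 0 ≠ 0 then
                          ((List.replicate (max N 0).toNat (0 : Int)).toArray).setIfInBounds 0
                            (PySem.Int.mod 1 M)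
                        else (List.replicate (max N 0).toNat (0 : Int)).toArray))
                     0 ((List.replicate (max N 0).toNat (0 : Int)).toArray))
               else
                 pvB_Q (max N 0) M
                   (pvB_passes (max N 0) M 1 (PySem.Int.floordiv N 2)
                     (if max N 0 ≠ 0 then
                        ((List.replicate (max N 0).toNat (0 : Int)).toArray).setIfInBounds 0
                          (PySem.Int.mod 1 M)
                      else (List.replicate (max N 0).toNat (0 : Int)).toArray))
                   0 ((List.replicate (max N 0).toNat (0 : Int)).toArray)) 0 0) M := rfl
      rw [h2', pvB_sum_stop _ _ 0 0 (by omega)]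
    rw [h1, h2]
  · obtain ⟨n, hn⟩ : ∃ n : Nat, N = (n : Int) := ⟨N.toNat, by omega⟩
    subst hn
    have hn1 : 1 ≤ (n : Int) := by omega
    have h2pos : (0:Int) < 2 := by norm_num
    have hk0 : 0 ≤ PySem.Int.floordiv ((n:Int)) 2 :=
      (PySem.Int.le_floordiv_iff_mul_le h2pos).mpr (by omega)
    have hkn : PySem.Int.floordiv ((n:Int)) 2 ≤ ((n:Int)) := by
      have := (PySem.Int.floordiv_lt_iff_lt_mul (a := ((n:Int))) (q := ((n:Int)) + 1) h2pos).mpr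
        (by omega)
      omega
    have hm1 : 1 ≤ PySem.Int.floordiv ((n:Int) + 1) 2 :=
      (PySem.Int.le_floordiv_iff_mul_le h2pos).mpr (by omega)
    have hmn : PySem.Int.floordiv ((n:Int) + 1) 2 ≤ ((n:Int)) := by
      have := (PySem.Int.floordiv_lt_iff_lt_mul (a := ((n:Int)) + 1) (q := ((n:Int)) + 1) h2pos).mpr
        (by omega)
      omega
    -- the two ports, written out (rfl: the let-bindings are definitional)
    have hA : count_score_assignments ((n:Int)) M
        = PySem.Int.mod (((List.range ((n:Int)).toNat).map (fun j : Nat =>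
            (pvA_outer ((n:Int)) M
              (if PySem.Int.band ((n:Int)) 1 ≠ 0 then
                 (PySem.List.pyRange 1 (PySem.Int.floordiv ((n:Int)) 2 + 1) 1
                   ++ PySem.List.pyRange 1 (PySem.Int.floordiv ((n:Int)) 2 + 1) 1)
                   ++ [PySem.Int.floordiv ((n:Int) + 1) 2]
               else PySem.List.pyRange 1 (PySem.Int.floordiv ((n:Int)) 2 + 1) 1
                   ++ PySem.List.pyRange 1 (PySem.Int.floordiv ((n:Int)) 2 + 1) 1)
              (([(1 : Int)] ++ List.replicate (((n:Int)) + ((n:Int))).toNat 0).toArray)).getD j 0)).sum) M := rfl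
    have hB : count_score_assignments_alt ((n:Int)) M
        = PySem.Int.mod (pvB_sum (max ((n:Int)) 0)
            (if 0 < ((n:Int)) ∧ PySem.Int.band ((n:Int)) 1 ≠ 0 then
               pvB_pass (max ((n:Int)) 0) M (PySem.Int.floordiv ((n:Int) + 1) 2)
                 (PySem.Int.floordiv ((n:Int) + 1) 2)
                 (pvB_Q (max ((n:Int)) 0) M
                   (pvB_passes (max ((n:Int)) 0) M 1 (PySem.Int.floordiv ((n:Int)) 2)
                     (if max ((n:Int)) 0 ≠ 0 then
                        ((List.replicate (max ((n:Int)) 0).toNat (0 : Int)).toArray).setIfInBounds 0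
                          (PySem.Int.mod 1 M)
                      else (List.replicate (max ((n:Int)) 0).toNat (0 : Int)).toArray))
                   0 ((List.replicate (max ((n:Int)) 0).toNat (0 : Int)).toArray))
             else
               pvB_Q (max ((n:Int)) 0) M
                 (pvB_passes (max ((n:Int)) 0) M 1 (PySem.Int.floordiv ((n:Int)) 2)
                   (if max ((n:Int)) 0 ≠ 0 then
                      ((List.replicate (max ((n:Int)) 0).toNat (0 : Int)).toArray).setIfInBounds 0
                        (PySem.Int.mod 1 M)
                    else (List.replicate (max ((n:Int)) 0).toNat (0 : Int)).toArray))
                 0 ((List.replicate (max ((n:Int)) 0).toNat (0 : Int)).toArray)) 0 0) M := rfl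
    rw [hA, hB]
    rw [max_eq_left (show (0:Int) ≤ ((n:Int)) by omega), Int.toNat_natCast]
    rw [if_pos (show ((n:Int)) ≠ 0 by omega)]
    rw [pv_list_sum]
    -- names for the pieces
    set kI := PySem.Int.floordiv ((n:Int)) 2 with hkI
    set mI := PySem.Int.floordiv ((n:Int) + 1) 2 with hmI
    set RL := PySem.List.pyRange 1 (kI + 1) 1 with hRLdef
    set d0A : Array Int := ([(1 : Int)] ++ List.replicate (((n:Int)) + ((n:Int))).toNat 0).toArray
      with hd0A
    set P1 : Array Int :=
      ((List.replicate n (0 : Int)).toArray).setIfInBounds 0 (PySem.Int.mod 1 M) with hP1def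
    set Q0 : Array Int := (List.replicate n (0 : Int)).toArray with hQ0def
    set Pst := pvB_passes ((n:Int)) M 1 kI P1 with hPstdef
    set Q1 := pvB_Q ((n:Int)) M Pst 0 Q0 with hQ1def
    set Pp := pvFold (RL.map Int.toNat) pvDelta with hPpdef
    have hRLmem : ∀ x ∈ RL, 1 ≤ x ∧ x ≤ ((n:Int)) := by
      intro x hx
      rw [hRLdef] at hx
      have h1 := (PySem.List.mem_pyRange_one.mp hx).1
      have h2 := (PySem.List.mem_pyRange_one.mp hx).2
      exact ⟨h1, by omega⟩
    have hd0Asz : ((((n:Int)) + ((n:Int))).toNat + 1 : Nat) = d0A.size := by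
      rw [hd0A]
      simp only [List.size_toArray, List.length_append, List.length_cons, List.length_nil,
        List.length_replicate]
      omega
    have hd0Ad : ∀ t : Nat, ((t:Int)) ≤ ((n:Int)) → d0A.getD t 0 ≡ pvDelta t [ZMOD M] := by
      intro t _
      have : d0A.getD t 0 = pvDelta t := by
        rw [hd0A, List.singleton_append, pv_getD_toArray]
        cases t with
        | zero => simp [pvDelta]
        | succ m =>
            rw [List.getD_cons_succ]
            by_cases hm : m < (((n:Int)) + ((n:Int))).toNat
            · rw [List.getD_replicate _ hm]
              simp [pvDelta]
            · rw [List.getD_eq_default _ _ (by simp; omega)]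
              simp [pvDelta]
      rw [this]
    have hQ0sz : Q0.size = ((n:Int)).toNat := by
      rw [hQ0def]
      simp only [List.size_toArray, List.length_replicate]
      omega
    have hP1sz : P1.size = ((n:Int)).toNat := by
      rw [hP1def, pv_size_set]
      exact hQ0sz
    have hP1d : ∀ t : Nat, ((t:Int)) < ((n:Int)) → P1.getD t 0 ≡ pvDelta t [ZMOD M] := by
      intro t _
      rw [hP1def]
      by_cases h0 : t = 0
      · subst h0
        rw [pv_getD_set_self _ _ _ (by omega)]
        simpa [pvDelta] using pv_pymod_modEq 1 M
      · rw [pv_getD_set_ne _ 0 t _ (fun he => h0 he.symm), hQ0def, pv_getD_replicate]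
        simp [pvDelta, h0]
    have hPst : ∀ t : Nat, ((t:Int)) < ((n:Int)) → Pst.getD t 0 ≡ Pp t [ZMOD M] := by
      intro t ht
      rw [hPstdef, hPpdef, hRLdef]
      exact pvB_passes_modEq 1 kI P1 pvDelta (by norm_num) hP1sz hP1d t ht
    have hPstsz : Pst.size = ((n:Int)).toNat := by
      rw [hPstdef, pvB_passes_size]
      exact hP1sz
    have hQ1v : ∀ t : Nat, ((t:Int)) < ((n:Int)) → Q1.getD t 0 ≡ pvConv Pp Pp t [ZMOD M] := by
      intro t ht
      have hc := pvB_Q_char ((n:Int)) M Pst 0 Q0 le_rfl hQ0sz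
        (by intro t' h0 h1; omega) ((t:Int)) (by omega) ht
      rw [Int.toNat_natCast] at hc
      rw [hQ1def, hc, pvB_dot_eq Pst t]
      refine (pv_pymod_modEq _ _).trans ?_
      refine pv_sum_modEq ?_
      intro i hi
      exact Int.ModEq.mul (hPst i (by omega)) (hPst (t - i) (by omega))
    have hQ1sz : Q1.size = ((n:Int)).toNat := by
      rw [hQ1def, pvB_Q_size]
      exact hQ0sz
    -- the square: folding the pass list over Pp is the self-convolution
    have hX : ∀ t, pvFold (RL.map Int.toNat) (pvFold (RL.map Int.toNat) pvDelta) t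
        = pvConv Pp Pp t := by
      intro t
      rw [pvFold_conv_self (RL.map Int.toNat) (pvFold (RL.map Int.toNat) pvDelta) t, ← hPpdef]
    by_cases hodd : PySem.Int.band ((n:Int)) 1 ≠ 0
    · rw [if_pos hodd, if_pos ⟨by omega, hodd⟩]
      have hAterm : ∀ j : Nat, ((j:Int)) ≤ ((n:Int)) →
          (pvA_outer ((n:Int)) M ((RL ++ RL) ++ [mI]) d0A).getD j 0
            ≡ pvPass mI.toNat (pvConv Pp Pp) j [ZMOD M] := by
        intro j hj
        have hmem : ∀ x ∈ (RL ++ RL) ++ [mI], 1 ≤ x ∧ x ≤ ((n:Int)) := by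
          intro x hx
          rcases List.mem_append.mp hx with hx | hx
          · rcases List.mem_append.mp hx with hx | hx
            · exact hRLmem x hx
            · exact hRLmem x hx
          · rw [List.mem_singleton.mp hx]; exact ⟨hm1, hmn⟩
        have hfold := pvA_outer_modEq ((RL ++ RL) ++ [mI]) hmem d0A pvDelta
          hd0Asz hd0Ad j hj
        refine hfold.trans ?_
        have heq : pvFold (((RL ++ RL) ++ [mI]).map Int.toNat) pvDelta j
            = pvPass mI.toNat (pvConv Pp Pp) j := by
          rw [List.map_append, List.map_append, pvFold_append, pvFold_append]
          show pvPass mI.toNat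
            (pvFold (RL.map Int.toNat) (pvFold (RL.map Int.toNat) pvDelta)) j = _
          rw [funext hX]
        rw [heq]
      have hBterm : ∀ j : Nat, ((j:Int)) < ((n:Int)) →
          (pvB_pass ((n:Int)) M mI mI Q1).getD j 0
            ≡ pvPass mI.toNat (pvConv Pp Pp) j [ZMOD M] :=
        fun j hj => pvB_pass_modEq hm1 hQ1sz hQ1v j hj
      rw [pvB_sum_char ((n:Int)) _ 0 0 le_rfl]
      simp only [Int.toNat_zero, Int.toNat_natCast, zero_add, ← Finset.range_eq_Ico]
      refine pv_pymod_congr hM ?_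
      refine (pv_sum_modEq (g := fun j => pvPass mI.toNat (pvConv Pp Pp) j)
        (fun j hj => hAterm j (by omega))).trans ?_
      exact (pv_sum_modEq (fun j hj => hBterm j (by omega))).symm
    · rw [if_neg hodd, if_neg (by intro hc; exact hodd hc.2)]
      have hAterm : ∀ j : Nat, ((j:Int)) ≤ ((n:Int)) →
          (pvA_outer ((n:Int)) M (RL ++ RL) d0A).getD j 0
            ≡ pvConv Pp Pp j [ZMOD M] := by
        intro j hj
        have hmem : ∀ x ∈ RL ++ RL, 1 ≤ x ∧ x ≤ ((n:Int)) := by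
          intro x hx
          rcases List.mem_append.mp hx with hx | hx
          · exact hRLmem x hx
          · exact hRLmem x hx
        have hfold := pvA_outer_modEq (RL ++ RL) hmem d0A pvDelta hd0Asz hd0Ad j hj
        refine hfold.trans ?_
        have heq : pvFold ((RL ++ RL).map Int.toNat) pvDelta j = pvConv Pp Pp j := by
          rw [List.map_append, pvFold_append]
          exact hX j
        rw [heq]
      rw [pvB_sum_char ((n:Int)) _ 0 0 le_rfl]
      simp only [Int.toNat_zero, Int.toNat_natCast, zero_add, ← Finset.range_eq_Ico]
      refine pv_pymod_congr hM ?_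
      refine (pv_sum_modEq (g := fun j => pvConv Pp Pp j)
        (fun j hj => hAterm j (by omega))).trans ?_
      exact (pv_sum_modEq (fun j hj => hQ1v j (by omega))).symm

-- ===== VERDICT (by name: the statement is the Claim_ definition above) =====
theorem count_score_assignments_spec : Claim_equal_count_score_assignments := by
  intro N M _hDom hPre
  unfold Spec_count_score_assignments
  exact pv_main N M hPre
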